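-- pv_equiv track=rewrite | github.com/TheAlgorithms/Python | project_euler/problem_169/sol1.py | solve
-- ===== SOURCE A (Python) =====
-- dp = {}
--
-- def solve(n):
-- 	if n <= 1:
-- 		return n
-- 	if n in dp.keys():
-- 		return dp[n]
-- 	if n % 2:
-- 		out = solve((n - 1) // 2) + solve((n + 1) // 2)
-- 	else:
-- 		out = solve(n // 2)
-- 	dp[n] = out
-- 	return out
-- ===== SOURCE B (Python) =====
-- def solve(n):
--     if n <= 1:
--         return n
--     a, b = 1, 0
--     while n > 0:
--         if n % 2:
--             b += a
--         else:
--             a += b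
--         n //= 2
--     return b
-- ===== Notes on version B (the rewrite author's own statement) =====
-- stated objective: simpler
-- what changed: Replaces the memoized top-down recursion (global dict dp) with the standard iterative fusc loop over the binary digits of n maintaining two accumulators; no recursion and no global state.
import Mathlib
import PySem

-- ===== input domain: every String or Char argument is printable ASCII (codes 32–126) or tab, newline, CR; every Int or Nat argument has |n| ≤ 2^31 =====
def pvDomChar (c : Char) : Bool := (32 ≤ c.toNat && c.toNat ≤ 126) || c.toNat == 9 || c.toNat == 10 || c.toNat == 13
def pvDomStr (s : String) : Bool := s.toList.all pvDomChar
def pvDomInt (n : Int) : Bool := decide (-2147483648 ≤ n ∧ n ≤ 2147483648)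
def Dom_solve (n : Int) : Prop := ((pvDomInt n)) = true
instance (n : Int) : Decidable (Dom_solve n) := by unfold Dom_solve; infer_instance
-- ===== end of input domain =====

-- B replaces A's memoized top-down recursion with the standard iterative fusc loop
-- over the binary digits of n (two accumulators, no global memo): simpler, O(1) space.


-- ===== PORT A =====
-- literal port of A's recursion (the dp memo only caches results of this same
-- recursion and never changes the returned value, so it is elided here)
def solve (n : Int) : Int :=
  if n ≤ 1 then n
  else if PySem.Int.mod n 2 ≠ 0 then
    solve (PySem.Int.floordiv (n - 1) 2) + solve (PySem.Int.floordiv (n + 1) 2)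
  else
    solve (PySem.Int.floordiv n 2)
termination_by n.toNat
decreasing_by
  all_goals
    rw [PySem.Int.floordiv_eq_ediv_of_pos (by norm_num)]
    omega

-- ===== PORT B =====
-- the while-loop of Source B: state (n, a, b)
def fuscLoop (n a b : Int) : Int :=
  if 0 < n then
    if PySem.Int.mod n 2 ≠ 0 then fuscLoop (PySem.Int.floordiv n 2) a (b + a)
    else fuscLoop (PySem.Int.floordiv n 2) (a + b) b
  else b
termination_by n.toNat
decreasing_by
  all_goals
    rw [PySem.Int.floordiv_eq_ediv_of_pos (by norm_num)]
    omega

def solve_alt (n : Int) : Int :=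
  if n ≤ 1 then n
  else fuscLoop n 1 0

-- ===== PRECONDITION & SPEC =====
def Spec_solve (n : Int) (out : Int) : Prop := out = solve_alt n
instance (n : Int) (out : Int) : Decidable (Spec_solve n out) := by unfold Spec_solve; infer_instance

-- ===== CLAIM (what is proved, stated in full; the proofs are below) =====
def Claim_equal_solve : Prop := ∀ (n : Int), Dom_solve n → Spec_solve n (solve n)

-- ===== LEMMAS AND PROOFS =====

theorem solve_nonpos (n : Int) (h : n ≤ 1) : solve n = n := by
  rw [solve]; simp [h]

theorem solve_zero : solve 0 = 0 := solve_nonpos 0 (by norm_num)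
theorem solve_one : solve 1 = 1 := solve_nonpos 1 (by norm_num)

theorem solve_even (k : Int) (hk : 0 ≤ k) : solve (2 * k) = solve k := by
  rcases eq_or_lt_of_le hk with h0 | h0
  · rw [← h0]; norm_num
  · rw [solve]
    have h1 : ¬ (2 * k ≤ 1) := by omega
    have hm : PySem.Int.mod (2 * k) 2 = 0 := by
      rw [PySem.Int.mod_eq_emod_of_pos (by norm_num)]; omega
    have hd : PySem.Int.floordiv (2 * k) 2 = k := by
      rw [PySem.Int.floordiv_eq_ediv_of_pos (by norm_num)]; omega
    rw [if_neg h1, if_neg (by rw [hm]; simp), hd]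

theorem solve_odd (k : Int) (hk : 0 ≤ k) : solve (2 * k + 1) = solve k + solve (k + 1) := by
  rcases eq_or_lt_of_le hk with h0 | h0
  · rw [← h0]; norm_num [solve_zero, solve_one]
  · rw [solve]
    have h1 : ¬ (2 * k + 1 ≤ 1) := by omega
    have hm : PySem.Int.mod (2 * k + 1) 2 ≠ 0 := by
      rw [PySem.Int.mod_eq_emod_of_pos (by norm_num)]; omega
    have hd1 : PySem.Int.floordiv (2 * k + 1 - 1) 2 = k := by
      rw [PySem.Int.floordiv_eq_ediv_of_pos (by norm_num)]; omega
    have hd2 : PySem.Int.floordiv (2 * k + 1 + 1) 2 = k + 1 := by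
      rw [PySem.Int.floordiv_eq_ediv_of_pos (by norm_num)]; omega
    rw [if_neg h1, if_pos hm, hd1, hd2]

-- loop invariant: fuscLoop n a b = a * fusc n + b * fusc (n+1), with fusc = solve
theorem fuscLoop_eq (k : Nat) : ∀ (n a b : Int), n.toNat = k → 0 ≤ n →
    fuscLoop n a b = a * solve n + b * solve (n + 1) := by
  induction k using Nat.strong_induction_on with
  | _ k ih =>
    intro n a b hk hn
    rw [fuscLoop]
    by_cases hpos : 0 < n
    · have hdiv : PySem.Int.floordiv n 2 = n / 2 :=
        PySem.Int.floordiv_eq_ediv_of_pos (by norm_num)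
      have hmod : PySem.Int.mod n 2 = n % 2 :=
        PySem.Int.mod_eq_emod_of_pos (by norm_num)
      have hrec : (n / 2).toNat < k := by omega
      by_cases hodd : PySem.Int.mod n 2 ≠ 0
      · have hn' : n = 2 * (n / 2) + 1 := by omega
        rw [if_pos hpos, if_pos hodd, hdiv,
          ih _ hrec _ _ _ rfl (by omega)]
        have h1 : solve n = solve (n / 2) + solve (n / 2 + 1) := by
          conv_lhs => rw [hn']
          exact solve_odd (n / 2) (by omega)
        have h2 : solve (n + 1) = solve (n / 2 + 1) := by
          have : n + 1 = 2 * (n / 2 + 1) := by omega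
          rw [this, solve_even _ (by omega)]
        rw [h1, h2]; ring
      · have hn' : n = 2 * (n / 2) := by omega
        rw [if_pos hpos, if_neg hodd, hdiv,
          ih _ hrec _ _ _ rfl (by omega)]
        have h1 : solve n = solve (n / 2) := by
          conv_lhs => rw [hn']
          exact solve_even (n / 2) (by omega)
        have h2 : solve (n + 1) = solve (n / 2) + solve (n / 2 + 1) := by
          have : n + 1 = 2 * (n / 2) + 1 := by omega
          rw [this, solve_odd _ (by omega)]
        rw [h1, h2]; ring
    · have h0 : n = 0 := by omega
      rw [if_neg hpos, h0]
      norm_num [solve_zero, solve_one]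

-- ===== VERDICT (by name: the statement is the Claim_ definition above) =====
theorem solve_spec : Claim_equal_solve := by
  intro n _
  unfold Spec_solve solve_alt
  by_cases h : n ≤ 1
  · rw [if_pos h, solve_nonpos n h]
  · rw [if_neg h, fuscLoop_eq n.toNat n 1 0 rfl (by omega)]
    ring
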